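-- pv_equiv track=rewrite | github.com/kimdy003/Python_study | 4_etc/back_end/2.py | solution
-- ===== SOURCE A (Python) =====
-- def solution(leave, day, holidays):
--     answer = -1
--     if leave == 30:
--         return 30
--
--     dd = ["MON", "TUE", "WED", "THU", "FRI", "SAT", "SUN"]
--     idx = 0
--     for i, d in enumerate(dd):
--         if d == day:
--             idx = i
--     month = {(i + 1): dd[(idx + i) % 7] for i in range(31)}
--
--     for i in range(1, 31):
--         t_holiday, t_leave = i, leave
--         cnt = 0
--         while t_holiday != 31:
--             if (
--                 month[t_holiday] == "SAT"
--                 or month[t_holiday] == "SUN"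
--                 or t_holiday in holidays
--             ):
--                 cnt += 1
--             else:
--                 if t_leave == 0:
--                     break
--
--                 t_leave -= 1
--                 cnt += 1
--
--             t_holiday += 1
--
--         answer = max(answer, cnt)
--
--     return answer
-- ===== SOURCE B (Python) =====
-- def solution(leave, day, holidays):
--     names = ["MON", "TUE", "WED", "THU", "FRI", "SAT", "SUN"]
--     off = 0
--     for i, d in enumerate(names):
--         if d == day:
--             off = i
--     hol = set(holidays)
--
--     def rest(d):
--         return names[(off + d - 1) % 7] in ("SAT", "SUN") or d in hol
--
--     # dynamic programming over (day, remaining leave):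
--     # row[j] = longest rest streak starting on day j+1 using t leave days (row[30] = day 31 = 0)
--     row = [0]
--     for i in range(30, 0, -1):
--         row = [row[0] + 1 if rest(i) else 0] + row
--     cap = max(0, min(leave, 30))
--     for _ in range(cap):
--         new = [0]
--         for i in range(30, 0, -1):
--             new = [(new[0] if rest(i) else row[i]) + 1] + new
--         row = new
--     return max(row[:30])
-- ===== Notes on version B (the rewrite author's own statement) =====
-- stated objective: faster
-- what changed: Replaces A's per-start-day re-simulation (restarting a countdown scan, with a holidays list-membership test, from every day of the month) with a bottom-up dynamic-programming table over (day, remaining leave) built back-to-front once per leave budget (capped at 30) over a holiday set built once; the answer is the max of the start-day row.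
-- outside the precondition, e.g. on solution(-1, 'MON', []): A returns 30, B returns 2
import Mathlib
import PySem

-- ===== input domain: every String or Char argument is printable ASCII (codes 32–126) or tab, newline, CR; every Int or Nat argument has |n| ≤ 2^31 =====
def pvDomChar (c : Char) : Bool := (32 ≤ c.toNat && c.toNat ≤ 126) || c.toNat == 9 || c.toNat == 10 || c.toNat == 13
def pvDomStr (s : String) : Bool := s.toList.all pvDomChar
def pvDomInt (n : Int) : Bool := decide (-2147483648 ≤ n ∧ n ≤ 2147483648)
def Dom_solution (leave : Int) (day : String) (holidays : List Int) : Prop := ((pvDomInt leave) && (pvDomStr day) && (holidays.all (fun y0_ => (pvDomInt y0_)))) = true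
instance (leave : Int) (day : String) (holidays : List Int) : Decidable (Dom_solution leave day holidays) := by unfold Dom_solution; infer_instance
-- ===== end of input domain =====

-- B replaces A's per-start-day re-simulation of the month with a bottom-up DP table over (day, remaining leave), capped at 30 rows (objective: alternative).

-- ===== PORT A =====
-- the weekday-name list and the day-of-week index loop, identical in both Pythons
def pvDays : List String := ["MON", "TUE", "WED", "THU", "FRI", "SAT", "SUN"]

def pvDayIdx (day : String) : Int :=
  (PySem.List.enumerate pvDays 0).foldl (fun idx p => if p.2 = day then p.1 else idx) 0

-- month = {(i+1): dd[(idx+i)%7] for i in range(31)}; the .getD "" only guards the always-in-range dd index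
def pvMonthA (idx : Int) : PySem.Dict Int String :=
  (PySem.List.pyRange 0 31 1).foldl
    (fun m i => m.insert (i + 1) ((PySem.List.pyGet? pvDays (PySem.Int.mod (idx + i) 7)).getD ""))
    PySem.Dict.empty

-- the inner 'while t_holiday != 31' loop; fuel 31 suffices (t_holiday starts ≥ 1 and increases), never exhausted from the port's call
def pvInnerA (month : PySem.Dict Int String) (holidays : List Int) : Nat → Int → Int → Int → Int
  | 0, _, _, cnt => cnt
  | fuel + 1, t_holiday, t_leave, cnt =>
    if t_holiday = 31 then cnt
    else if month.getD t_holiday "" = "SAT" ∨ month.getD t_holiday "" = "SUN" ∨ t_holiday ∈ holidays then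
      pvInnerA month holidays fuel (t_holiday + 1) t_leave (cnt + 1)
    else if t_leave = 0 then cnt
    else pvInnerA month holidays fuel (t_holiday + 1) (t_leave - 1) (cnt + 1)

def solution (leave : Int) (day : String) (holidays : List Int) : Int :=
  if leave = 30 then 30
  else
    let idx := pvDayIdx day
    let month := pvMonthA idx
    (PySem.List.pyRange 1 31 1).foldl
      (fun answer i => max answer (pvInnerA month holidays 31 i leave 0)) (-1)

-- ===== PORT B =====
-- rest(d): weekend or holiday; the .getD "" only guards the always-in-range names index
def pvRestB (off : Int) (hol : PySem.Set Int) (d : Int) : Bool :=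
  (["SAT", "SUN"] : List String).contains ((PySem.List.pyGet? pvDays (PySem.Int.mod (off + d - 1) 7)).getD "")
    || PySem.Set.contains hol d

def solution_alt (leave : Int) (day : String) (holidays : List Int) : Int :=
  let off := pvDayIdx day
  let hol := PySem.Set.ofList holidays
  -- row[j] = longest rest streak starting on day j+1 with t leave days, built back to front; row[30] (day 31) = 0
  let row0 := (PySem.List.pyRange 30 0 (-1)).foldl
      (fun row i => (if pvRestB off hol i then row.headD 0 + 1 else 0) :: row) [(0 : Int)]
  let cap := max 0 (min leave 30)
  let row := (PySem.List.pyRange 0 cap 1).foldl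
      (fun row _ =>
        (PySem.List.pyRange 30 0 (-1)).foldl
          (fun nw i =>
            ((if pvRestB off hol i then nw.headD 0 else (PySem.List.pyGet? row i).getD 0) + 1) :: nw)
          [(0 : Int)])
      row0
  -- max(row[:30]); the slice always has 30 elements, the .getD 0 only discharges the Option
  (PySem.List.max? (PySem.List.slice row none (some 30)) (fun y => y)).getD 0

-- ===== PRECONDITION & SPEC =====
-- Pre_ excludes only negative `leave` (a leave-day count, so outside the task's natural domain):
-- there A returns 30 because its countdown check 't_leave == 0' is approached only from above and never fires, while B treats the budget as empty.
def Pre_solution (leave : Int) (day : String) (holidays : List Int) : Prop := 0 ≤ leave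
instance (leave : Int) (day : String) (holidays : List Int) : Decidable (Pre_solution leave day holidays) := by unfold Pre_solution; infer_instance
def pvWitness_solution : Int × String × List Int := (3, "WED", [7, 8])

def Spec_solution (leave : Int) (day : String) (holidays : List Int) (out : Int) : Prop := out = solution_alt leave day holidays
instance (leave : Int) (day : String) (holidays : List Int) (out : Int) : Decidable (Spec_solution leave day holidays out) := by unfold Spec_solution; infer_instance

-- ===== CLAIM (what is proved, stated in full; the proofs are below) =====
def Claim_equal_solution : Prop := ∀ (leave : Int) (day : String) (holidays : List Int), Dom_solution leave day holidays → Pre_solution leave day holidays → Spec_solution leave day holidays (solution leave day holidays)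

-- ===== LEMMAS AND PROOFS =====

def runR (rest : Int → Bool) : Nat → Int → Int → Int
  | 0, _, _ => 0
  | fuel + 1, h, t =>
    if h = 31 then 0
    else if rest h then 1 + runR rest fuel (h + 1) t
    else if t = 0 then 0
    else 1 + runR rest fuel (h + 1) (t - 1)

def runD (rest : Int → Bool) (h t : Int) : Int := runR rest (31 - h).toNat h t

theorem runR_sat (rest : Int → Bool) : ∀ (f : Nat) (h t t' : Int), h ≤ 31 → 31 - h ≤ t → 31 - h ≤ t' →
    runR rest f h t = runR rest f h t' := by
  intro f
  induction f with
  | zero => intro h t t' _ _ _; simp [runR]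
  | succ n ih =>
    intro h t t' hh ht ht'
    by_cases h31 : h = 31
    · subst h31; simp [runR]
    · simp only [runR, if_neg h31]
      by_cases hr : rest h = true
      · simp only [if_pos hr]
        rw [ih (h+1) t t' (by omega) (by omega) (by omega)]
      · simp only [if_neg hr]
        have ht0 : ¬ t = 0 := by omega
        have ht0' : ¬ t' = 0 := by omega
        simp only [if_neg ht0, if_neg ht0']
        rw [ih (h+1) (t-1) (t'-1) (by omega) (by omega) (by omega)]

theorem pvDayIdx_bounds (day : String) : 0 ≤ pvDayIdx day ∧ pvDayIdx day ≤ 6 := by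
  simp only [pvDayIdx, pvDays, PySem.List.enumerate_cons, PySem.List.enumerate_nil, List.foldl]
  split_ifs <;> omega

theorem month_getD (idx d : Int) (hi0 : 0 ≤ idx) (hi : idx ≤ 6) (hd0 : 1 ≤ d) (hd : d ≤ 30) :
    (pvMonthA idx).getD d "" = (PySem.List.pyGet? pvDays (PySem.Int.mod (idx + d - 1) 7)).getD "" := by
  interval_cases idx <;> interval_cases d <;> decide

theorem restA_iff (idx d : Int) (holidays : List Int) (hi0 : 0 ≤ idx) (hi : idx ≤ 6) (hd0 : 1 ≤ d) (hd : d ≤ 30) :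
    ((pvMonthA idx).getD d "" = "SAT" ∨ (pvMonthA idx).getD d "" = "SUN" ∨ d ∈ holidays)
      ↔ pvRestB idx (PySem.Set.ofList holidays) d = true := by
  rw [pvRestB, month_getD idx d hi0 hi hd0 hd]
  simp [PySem.Set.contains, PySem.Set.mem_ofList]
  tauto

theorem innerA_eq (idx : Int) (holidays : List Int) (hi0 : 0 ≤ idx) (hi : idx ≤ 6) :
    ∀ (fuel : Nat) (h t c : Int), 1 ≤ h → h ≤ 31 →
      pvInnerA (pvMonthA idx) holidays fuel h t c = c + runR (pvRestB idx (PySem.Set.ofList holidays)) fuel h t := by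
  intro fuel
  induction fuel with
  | zero => intro h t c _ _; simp [pvInnerA, runR]
  | succ n ih =>
    intro h t c h1 h31
    by_cases he : h = 31
    · subst he; simp [pvInnerA, runR]
    · have hb := restA_iff idx h holidays hi0 hi h1 (by omega)
      by_cases hP : ((pvMonthA idx).getD h "" = "SAT" ∨ (pvMonthA idx).getD h "" = "SUN" ∨ h ∈ holidays)
      · have hbt : pvRestB idx (PySem.Set.ofList holidays) h = true := hb.mp hP
        simp only [pvInnerA, runR, if_neg he, if_pos hP, if_pos hbt]
        rw [ih (h+1) t (c+1) (by omega) (by omega)]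
        ring
      · have hbf : pvRestB idx (PySem.Set.ofList holidays) h = false := by
          cases hx : pvRestB idx (PySem.Set.ofList holidays) h
          · rfl
          · exact absurd (hb.mpr hx) hP
        simp only [pvInnerA, runR, if_neg he, if_neg hP, hbf, Bool.false_eq_true, if_false]
        by_cases ht : t = 0
        · simp [ht]
        · simp only [if_neg ht]
          rw [ih (h+1) (t-1) (c+1) (by omega) (by omega)]
          ring

theorem fold_build_aux (F : Int → Int → Int) (q : Int → Int)
    (hq : ∀ h : Int, 1 ≤ h → h ≤ 30 → q h = F h (q (h + 1))) (hq31 : q 31 = 0) :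
    ∀ n : Nat, n ≤ 30 →
      (PySem.List.pyRange (31 - (n : Int)) 31 1).foldr (fun i row => F i (row.headD 0) :: row) [(0 : Int)]
        = (PySem.List.pyRange (31 - (n : Int)) 32 1).map q := by
  intro n
  induction n with
  | zero =>
    intro _
    rw [PySem.List.pyRange_one_eq_nil (by norm_num)]
    norm_num
    have hs : PySem.List.pyRange (31:Int) 32 1 = [(31:Int)] := by
      rw [show (32:Int) = 31 + 1 by norm_num]; exact PySem.List.pyRange_one_singleton _
    rw [hs]
    simp [hq31]
  | succ m ih =>
    intro hm
    have e1 : (31 : Int) - ((m : Int) + 1) = (31 - (m:Int)) - 1 := by ring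
    push_cast
    rw [e1]
    rw [PySem.List.pyRange_one_cons (by omega : (31 - (m:Int)) - 1 < 31)]
    simp only [List.foldr_cons]
    rw [show (31 - (m:Int)) - 1 + 1 = 31 - (m:Int) by ring]
    rw [ih (by omega)]
    have hcons : PySem.List.pyRange (31 - (m : Int)) 32 1 = (31 - (m:Int)) :: PySem.List.pyRange (31 - (m:Int) + 1) 32 1 :=
      PySem.List.pyRange_one_cons (by omega)
    rw [hcons]
    simp only [List.map_cons, List.headD_cons]
    rw [PySem.List.pyRange_one_cons (by omega : (31 - (m:Int)) - 1 < 32)]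
    simp only [List.map_cons]
    rw [show (31 - (m:Int)) - 1 + 1 = 31 - (m:Int) by ring, hcons]
    simp only [List.map_cons]
    congr 1
    have hrec := hq ((31 - (m:Int)) - 1) (by omega) (by omega)
    rw [show (31 - (m:Int)) - 1 + 1 = 31 - (m:Int) by ring] at hrec
    exact hrec.symm

theorem fold_build (F : Int → Int → Int) (q : Int → Int)
    (hq : ∀ h : Int, 1 ≤ h → h ≤ 30 → q h = F h (q (h + 1))) (hq31 : q 31 = 0) :
    (PySem.List.pyRange 30 0 (-1)).foldl (fun row i => F i (row.headD 0) :: row) [(0 : Int)]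
      = (PySem.List.pyRange 1 32 1).map q := by
  rw [PySem.List.pyRange_neg_one_eq_reverse, List.foldl_reverse]
  have := fold_build_aux F q hq hq31 30 (by norm_num)
  norm_num at this ⊢
  exact this

theorem get_rowList (q : Int → Int) (i : Int) (h1 : 1 ≤ i) (h2 : i ≤ 30) :
    (PySem.List.pyGet? ((PySem.List.pyRange 1 32 1).map q) i).getD 0 = q (i + 1) := by
  obtain ⟨k, rfl⟩ : ∃ k : Nat, i = (k : Int) := ⟨i.toNat, by omega⟩
  rw [PySem.List.pyGet?_natCast]
  rw [List.getElem?_map]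
  have hk : k < (PySem.List.pyRange 1 32 1).length := by
    rw [PySem.List.length_pyRange_one]; omega
  rw [List.getElem?_eq_getElem hk]
  simp only [Option.map_some, Option.getD_some]
  rw [PySem.List.getElem_pyRange_one]
  ring_nf

theorem runD_rec0 (rest : Int → Bool) (h : Int) (h1 : 1 ≤ h) (h2 : h ≤ 30) :
    runD rest h 0 = if rest h then runD rest (h + 1) 0 + 1 else 0 := by
  simp only [runD]
  rw [show (31 - h).toNat = (31 - (h + 1)).toNat + 1 by omega]
  simp only [runR, if_neg (show ¬ h = 31 by omega)]
  split_ifs <;> ring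

theorem runD_recS (rest : Int → Bool) (h t : Int) (h1 : 1 ≤ h) (h2 : h ≤ 30) (ht : 0 ≤ t) :
    runD rest h (t + 1) = (if rest h then runD rest (h + 1) (t + 1) else runD rest (h + 1) t) + 1 := by
  simp only [runD]
  rw [show (31 - h).toNat = (31 - (h + 1)).toNat + 1 by omega]
  simp only [runR, if_neg (show ¬ h = 31 by omega), if_neg (show ¬ t + 1 = 0 by omega)]
  rw [show t + 1 - 1 = t by ring]
  split_ifs <;> ring

def rowList (rest : Int → Bool) (t : Int) : List Int :=
  (PySem.List.pyRange 1 32 1).map (fun h => runD rest h t)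

theorem row0_eq (rest : Int → Bool) :
    (PySem.List.pyRange 30 0 (-1)).foldl (fun row i => (if rest i then row.headD 0 + 1 else 0) :: row) [(0 : Int)]
      = rowList rest 0 :=
  fold_build (fun i v => if rest i then v + 1 else 0) (fun h => runD rest h 0)
    (fun h h1 h2 => runD_rec0 rest h h1 h2) rfl

theorem rowT_eq (rest : Int → Bool) (t : Int) (ht : 0 ≤ t) :
    (PySem.List.pyRange 30 0 (-1)).foldl
      (fun nw i => ((if rest i then nw.headD 0 else (PySem.List.pyGet? (rowList rest t) i).getD 0) + 1) :: nw)
      [(0 : Int)]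
      = rowList rest (t + 1) := by
  apply fold_build (fun i v => (if rest i then v else (PySem.List.pyGet? (rowList rest t) i).getD 0) + 1)
  · intro h h1 h2
    rw [runD_recS rest h t h1 h2 ht]
    congr 1
    simp only [rowList]
    rw [get_rowList (fun x => runD rest x t) h h1 h2]
  · rfl

theorem rows_iter (rest : Int → Bool) :
    ∀ (l : List Int) (t : Int), 0 ≤ t →
      l.foldl (fun row _ =>
          (PySem.List.pyRange 30 0 (-1)).foldl
            (fun nw i => ((if rest i then nw.headD 0 else (PySem.List.pyGet? row i).getD 0) + 1) :: nw)
            [(0 : Int)])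
        (rowList rest t)
      = rowList rest (t + l.length) := by
  intro l
  induction l with
  | nil => intro t ht; simp
  | cons x xs ih =>
    intro t ht
    simp only [List.foldl_cons]
    rw [rowT_eq rest t ht, ih (t + 1) (by omega)]
    congr 1
    simp only [List.length_cons]
    push_cast
    ring

theorem runR_fuel (rest : Int → Bool) : ∀ (f f' : Nat) (h t : Int), h ≤ 31 → (31 - h).toNat ≤ f → (31 - h).toNat ≤ f' →
    runR rest f h t = runR rest f' h t := by
  intro f
  induction f with
  | zero =>
    intro f' h t hh hf hf'
    have h31 : h = 31 := by omega
    subst h31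
    cases f' <;> simp [runR]
  | succ n ih =>
    intro f' h t hh hf hf'
    by_cases h31 : h = 31
    · subst h31; cases f' <;> simp [runR]
    · obtain ⟨m, rfl⟩ : ∃ m, f' = m + 1 := ⟨f' - 1, by omega⟩
      simp only [runR, if_neg h31]
      split_ifs with hr ht
      · rw [ih m (h+1) t (by omega) (by omega) (by omega)]
      · rfl
      · rw [ih m (h+1) (t-1) (by omega) (by omega) (by omega)]

theorem rowList_take (rest : Int → Bool) (t : Int) :
    PySem.List.slice (rowList rest t) none (some 30)
      = (PySem.List.pyRange 1 31 1).map (fun h => runD rest h t) := by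
  rw [PySem.List.slice_to (rowList rest t) (by norm_num)]
  simp only [rowList]
  rw [show (32:Int) = 31 + 1 from rfl, PySem.List.pyRange_one_succ_right (by norm_num : (1:Int) ≤ 31)]
  rw [List.map_append]
  apply List.take_left'
  rw [List.length_map, PySem.List.length_pyRange_one]
  norm_num

theorem alt_eq (leave : Int) (day : String) (holidays : List Int) :
    solution_alt leave day holidays =
      ((PySem.List.pyRange 2 31 1).map
          (fun h => runD (pvRestB (pvDayIdx day) (PySem.Set.ofList holidays)) h (max 0 (min leave 30)))).foldl
        max (runD (pvRestB (pvDayIdx day) (PySem.Set.ofList holidays)) 1 (max 0 (min leave 30))) := by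
  simp only [solution_alt]
  rw [row0_eq]
  rw [rows_iter (pvRestB (pvDayIdx day) (PySem.Set.ofList holidays)) _ 0 le_rfl]
  rw [PySem.List.length_pyRange_one]
  rw [show (0:Int) + (((max 0 (min leave 30)) - 0).toNat : Int) = max 0 (min leave 30) by
    have h0 : (0:Int) ≤ max 0 (min leave 30) := le_max_left _ _
    omega]
  rw [rowList_take]
  rw [show (31:Int) = 1 + 30 from rfl, PySem.List.pyRange_one_cons (by norm_num : (1:Int) < 1 + 30)]
  rw [List.map_cons, PySem.List.max?_id_cons, Option.getD_some]
  norm_num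

theorem a_eq (leave : Int) (day : String) (holidays : List Int) (hl : ¬ leave = 30) :
    solution leave day holidays =
      (PySem.List.pyRange 1 31 1).foldl
        (fun answer i => max answer (runD (pvRestB (pvDayIdx day) (PySem.Set.ofList holidays)) i leave)) (-1) := by
  obtain ⟨hi0, hi6⟩ := pvDayIdx_bounds day
  simp only [solution, if_neg hl]
  apply PySem.List.foldl_congr_mem
  intro acc i hi
  rw [PySem.List.mem_pyRange_one] at hi
  rw [innerA_eq (pvDayIdx day) holidays hi0 hi6 31 i leave 0 (by omega) (by omega)]
  rw [runR_fuel (pvRestB (pvDayIdx day) (PySem.Set.ofList holidays)) 31 (31 - i).toNat i leave (by omega) (by omega) (by omega)]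
  simp only [runD, zero_add]

theorem runR_nonneg (rest : Int → Bool) : ∀ (fuel : Nat) (h t : Int), 0 ≤ runR rest fuel h t := by
  intro fuel
  induction fuel with
  | zero => intro h t; simp [runR]
  | succ n ih =>
    intro h t
    simp only [runR]
    split_ifs <;> first | simp | (have := ih (h+1) t; omega) | (have := ih (h+1) (t-1); omega)

theorem runR_le (rest : Int → Bool) : ∀ (fuel : Nat) (h t : Int), h ≤ 31 → runR rest fuel h t ≤ 31 - h := by
  intro fuel
  induction fuel with
  | zero => intro h t hh; simp [runR]; omega
  | succ n ih =>
    intro h t hh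
    simp only [runR]
    split_ifs with h1 h2 h3
    · omega
    · have := ih (h + 1) t (by omega); omega
    · omega
    · have := ih (h + 1) (t - 1) (by omega); omega

theorem runR_full (rest : Int → Bool) : ∀ (f : Nat) (h t : Int), h ≤ 31 → (31 - h).toNat ≤ f → 31 - h ≤ t →
    runR rest f h t = 31 - h := by
  intro f
  induction f with
  | zero => intro h t hh hf ht; simp only [runR]; omega
  | succ n ih =>
    intro h t hh hf ht
    by_cases h31 : h = 31
    · subst h31; simp [runR]
    · simp only [runR, if_neg h31]
      split_ifs with hr h0
      · rw [ih (h+1) t (by omega) (by omega) (by omega)]; omega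
      · omega
      · rw [ih (h+1) (t-1) (by omega) (by omega) (by omega)]; omega

theorem solution_main (leave : Int) (day : String) (holidays : List Int) (hpre : 0 ≤ leave) :
    solution leave day holidays = solution_alt leave day holidays := by
  rw [alt_eq]
  set rest := pvRestB (pvDayIdx day) (PySem.Set.ofList holidays) with hrest
  by_cases hl : leave = 30
  · subst hl
    rw [show max (0:Int) (min 30 30) = 30 by norm_num]
    have hq1 : runD rest 1 30 = 30 := by
      have := runR_full rest ((31 - (1:Int)).toNat) 1 30 (by norm_num) (le_refl _) (by norm_num)
      simpa [runD] using this
    rw [hq1, show solution 30 day holidays = 30 by simp [solution]]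
    have hub : ∀ y ∈ (PySem.List.pyRange 2 31 1).map (fun h => runD rest h 30), y ≤ 30 := by
      intro y hy
      rw [List.mem_map] at hy
      obtain ⟨i, hi, rfl⟩ := hy
      rw [PySem.List.mem_pyRange_one] at hi
      have := runR_le rest ((31 - i).toNat) i 30 (by omega)
      simp only [runD]
      omega
    have h1 := PySem.List.le_foldl_max ((PySem.List.pyRange 2 31 1).map (fun h => runD rest h 30)) 30
    rcases PySem.List.foldl_max_mem ((PySem.List.pyRange 2 31 1).map (fun h => runD rest h 30)) 30 with h2 | h2
    · exact h2.symm
    · have := hub _ h2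
      have := h1.1
      omega
  · rw [a_eq leave day holidays hl]
    rw [PySem.List.foldl_congr_mem (PySem.List.pyRange 1 31 1) _
        (fun answer i => max answer (runD rest i (max 0 (min leave 30)))) (-1)
        (by
          intro acc i hi
          rw [PySem.List.mem_pyRange_one] at hi
          by_cases h30 : leave ≤ 30
          · rw [show max 0 (min leave 30) = leave by omega]
          · rw [show max 0 (min leave 30) = 30 by omega]
            simp only [runD]
            rw [runR_sat rest ((31 - i).toNat) i leave 30 (by omega) (by omega) (by omega)])]
    rw [← List.foldl_map]
    rw [show (31:Int) = 1 + 30 from rfl, PySem.List.pyRange_one_cons (by norm_num : (1:Int) < 1 + 30)]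
    rw [List.map_cons, List.foldl_cons]
    rw [max_eq_right (by have := runR_nonneg rest ((31 - (1:Int)).toNat) 1 (max 0 (min leave 30)); simp only [runD]; omega)]
    norm_num

-- ===== VERDICT (by name: the statement is the Claim_ definition above) =====
theorem solution_spec : Claim_equal_solution := by
  intro leave day holidays _ hpre
  show solution leave day holidays = solution_alt leave day holidays
  exact solution_main leave day holidays hpre
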